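-- pv_equiv track=rewrite | github.com/Cathyyyyy123/dsc80-2023-fa | labs/lab01/lab.py | exploded_numbers
-- ===== SOURCE A (Python) =====
-- def exploded_numbers(ints, n):
--     result = []
--     largest = max(ints) + n
--     length = len(str(largest))
--     for i in range(len(ints)):
--         exploded_str = ''
--         result_str = ''
--         for j in range(n):
--             exploded_str = str(ints[i] - (j+1)).zfill(length)
--             result_str = exploded_str + ' ' + result_str
--         for k in range(n + 1):
--             exploded_str = str(ints[i] + (k)).zfill(length)
--             result_str = result_str + exploded_str + ' '
--         result.append(result_str.strip())
--     return result
-- ===== SOURCE B (Python) =====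
-- def exploded_numbers(ints, n):
--     largest = max(ints) + n
--     length = len(str(largest))
--     return [' '.join(str(x).zfill(length) for x in range(v - n, v + n + 1))
--             for v in ints]
-- ===== Notes on version B (the rewrite author's own statement) =====
-- stated objective: simpler
-- what changed: A builds each entry with two oppositely-directed inner loops (a downward loop prepending the n smaller neighbours, then an upward loop appending the n+1 remaining values) plus a final strip of the trailing space; B keeps the identical largest/length precomputation but produces the entry in one ascending pass over the contiguous range(v-n, v+n+1), zero-filling each value and joining with ' ' (join is linear in the entry width where A's repeated concatenation is quadratic).
import Mathlib
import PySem

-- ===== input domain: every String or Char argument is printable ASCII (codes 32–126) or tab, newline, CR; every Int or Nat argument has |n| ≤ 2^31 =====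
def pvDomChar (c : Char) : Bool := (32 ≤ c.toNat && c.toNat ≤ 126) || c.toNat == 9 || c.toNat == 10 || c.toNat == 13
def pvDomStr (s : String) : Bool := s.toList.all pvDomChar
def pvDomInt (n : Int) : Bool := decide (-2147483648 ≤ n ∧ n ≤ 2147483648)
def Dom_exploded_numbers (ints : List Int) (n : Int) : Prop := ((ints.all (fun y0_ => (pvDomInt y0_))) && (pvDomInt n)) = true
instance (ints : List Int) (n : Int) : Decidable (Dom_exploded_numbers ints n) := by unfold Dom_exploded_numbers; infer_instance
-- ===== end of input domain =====

-- B replaces A's two oppositely-directed inner loops (downward prepend pass, then upward append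
-- pass, then strip) by one ascending pass over the contiguous range joined with ' ' (objective: simpler).

-- ===== PORT A =====
def exploded_numbers (ints : List Int) (n : Int) : List String :=
  match PySem.List.max? ints (fun y => y) with
  | none => []         -- max([]) raises ValueError; excluded by Pre_
  | some m =>
    let largest : Int := m + n
    let length : Int := PySem.Str.len (PySem.Int.toStr largest)
    (PySem.List.pyRange 0 (PySem.List.len ints)).foldl
      (fun result i =>
        let xi := PySem.List.pyGetD ints i 0   -- ints[i], i drawn from range(len(ints)), always in range
        let rs1 := (PySem.List.pyRange 0 n).foldl
          (fun result_str j =>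
            PySem.Str.zfill (PySem.Int.toStr (xi - (j + 1))) length ++ " " ++ result_str) ""
        let rs2 := (PySem.List.pyRange 0 (n + 1)).foldl
          (fun result_str k =>
            result_str ++ PySem.Str.zfill (PySem.Int.toStr (xi + k)) length ++ " ") rs1
        result ++ [PySem.Str.strip rs2]) []

-- ===== PORT B =====
def exploded_numbers_alt (ints : List Int) (n : Int) : List String :=
  match PySem.List.max? ints (fun y => y) with
  | none => []         -- max([]) raises ValueError; excluded by Pre_
  | some m =>
    let length : Int := PySem.Str.len (PySem.Int.toStr (m + n))
    ints.map (fun v =>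
      PySem.Str.join " " ((PySem.List.pyRange (v - n) (v + n + 1)).map
        (fun x => PySem.Str.zfill (PySem.Int.toStr x) length)))

-- ===== PRECONDITION & SPEC =====
-- Pre_ excludes only the empty list, on which both A and B raise ValueError (max() of empty sequence).
def Pre_exploded_numbers (ints : List Int) (n : Int) : Prop := ints ≠ []
instance (ints : List Int) (n : Int) : Decidable (Pre_exploded_numbers ints n) := by unfold Pre_exploded_numbers; infer_instance
def pvWitness_exploded_numbers : List Int × Int := ([3, 8, 15], 2)

def Spec_exploded_numbers (ints : List Int) (n : Int) (out : List String) : Prop := out = exploded_numbers_alt ints n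
instance (ints : List Int) (n : Int) (out : List String) : Decidable (Spec_exploded_numbers ints n out) := by unfold Spec_exploded_numbers; infer_instance

-- ===== CLAIM (what is proved, stated in full; the proofs are below) =====
def Claim_equal_exploded_numbers : Prop := ∀ (ints : List Int) (n : Int), Dom_exploded_numbers ints n → Pre_exploded_numbers ints n → Spec_exploded_numbers ints n (exploded_numbers ints n)

-- ===== LEMMAS AND PROOFS =====


lemma pv_zfill_chars_sub (cs : List Char) (w : Int) :
    ∀ c ∈ PySem.Chars.zfill cs w, c ∈ cs ∨ c = '0' := by
  intro c hc
  cases cs with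
  | nil =>
    simp only [PySem.Chars.zfill] at hc
    split_ifs at hc
    · exact Or.inl hc
    · exact Or.inr (List.eq_of_mem_replicate hc)
  | cons c0 rest =>
    simp only [PySem.Chars.zfill] at hc
    split_ifs at hc
    · exact Or.inl hc
    · rcases List.mem_cons.1 hc with hc | hc
      · exact Or.inl (by simp [hc])
      · rcases List.mem_append.1 hc with hc | hc
        · exact Or.inr (List.eq_of_mem_replicate hc)
        · exact Or.inl (by simp [hc])
    · rcases List.mem_append.1 hc with hc | hc
      · exact Or.inr (List.eq_of_mem_replicate hc)
      · exact Or.inl hc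

lemma pv_zfill_ne_nil (w : Int) (cs : List Char) (h : cs ≠ []) : PySem.Chars.zfill cs w ≠ [] := by
  cases cs with
  | nil => exact absurd rfl h
  | cons c0 rest =>
    simp only [PySem.Chars.zfill]
    split_ifs <;> simp

lemma pv_dropWhile_eq_self {l : List Char} (h : ∀ c ∈ l, PySem.Chars.isspace c = false) :
    List.dropWhile PySem.Chars.isspace l = l := by
  cases l with
  | nil => rfl
  | cons c t => simp [List.dropWhile, h c (by simp)]

lemma pv_rstrip_no_trailing {p : List Char}
    (h : ∀ c ∈ p, PySem.Chars.isspace c = false) :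
    PySem.Chars.rstrip (p ++ [' ']) = p := by
  unfold PySem.Chars.rstrip
  rw [List.reverse_append]
  have hsp : PySem.Chars.isspace ' ' = true := by decide
  simp only [List.reverse_singleton, List.singleton_append, List.dropWhile, hsp]
  rw [pv_dropWhile_eq_self (by intro c hc; exact h c (List.mem_reverse.1 hc))]
  simp

lemma pv_rstrip_append (a b : List Char) (hb : PySem.Chars.rstrip b ≠ []) :
    PySem.Chars.rstrip (a ++ b) = a ++ PySem.Chars.rstrip b := by
  unfold PySem.Chars.rstrip at *
  rw [List.reverse_append, List.dropWhile_append]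
  have h2 : (List.dropWhile PySem.Chars.isspace b.reverse).isEmpty = false := by
    cases h : List.dropWhile PySem.Chars.isspace b.reverse with
    | nil => exact absurd (by simp [h]) hb
    | cons c t => simp
  rw [h2]
  simp

lemma pv_intercalate_cons₂ (s a b : List Char) (l : List (List Char)) :
    List.intercalate s (a :: b :: l) = a ++ s ++ List.intercalate s (b :: l) := by
  simp [List.intercalate, List.intersperse]

lemma pv_rstrip_flat : ∀ (ps : List (List Char)), ps ≠ [] →
    (∀ p ∈ ps, p ≠ []) → (∀ p ∈ ps, ∀ c ∈ p, PySem.Chars.isspace c = false) →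
    PySem.Chars.rstrip ((ps.map (fun p => p ++ [' '])).flatten) = List.intercalate [' '] ps := by
  intro ps
  induction ps with
  | nil => intro h; exact absurd rfl h
  | cons p t ih =>
    intro _ h1 h2
    cases t with
    | nil =>
      simp only [List.map_cons, List.map_nil, List.flatten_cons, List.flatten_nil, List.append_nil]
      rw [pv_rstrip_no_trailing (h2 p (by simp))]
      simp [List.intercalate]
    | cons q r =>
      have hrec := ih (by simp) (fun x hx => h1 x (by simp [hx])) (fun x hx => h2 x (by simp [hx]))
      have hqne : List.intercalate [' '] (q :: r) ≠ [] := by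
        cases r with
        | nil =>
          have := h1 q (by simp)
          simpa [List.intercalate] using this
        | cons q' r' =>
          rw [pv_intercalate_cons₂]
          have hq := h1 q (by simp)
          intro hcontra
          rw [List.append_assoc] at hcontra
          rcases List.append_eq_nil_iff.1 hcontra with ⟨hq', _⟩
          exact hq hq'
      have hflat : (List.map (fun p => p ++ [' ']) (p :: q :: r)).flatten
          = (p ++ [' ']) ++ (List.map (fun p => p ++ [' ']) (q :: r)).flatten := by
        simp
      rw [hflat, pv_rstrip_append _ _ (by rw [hrec]; exact hqne), hrec, pv_intercalate_cons₂]

lemma pv_strip_flat (ps : List (List Char))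
    (h1 : ∀ p ∈ ps, p ≠ []) (h2 : ∀ p ∈ ps, ∀ c ∈ p, PySem.Chars.isspace c = false) :
    PySem.Chars.strip ((ps.map (fun p => p ++ [' '])).flatten) = PySem.Chars.join [' '] ps := by
  cases ps with
  | nil => rfl
  | cons p t =>
    unfold PySem.Chars.strip PySem.Chars.join
    have hp := h1 p (by simp)
    have hlstrip : PySem.Chars.lstrip ((List.map (fun p => p ++ [' ']) (p :: t)).flatten)
        = (List.map (fun p => p ++ [' ']) (p :: t)).flatten := by
      unfold PySem.Chars.lstrip
      cases p with
      | nil => exact absurd rfl hp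
      | cons c p' =>
        have hc : PySem.Chars.isspace c = false := h2 (c :: p') (by simp) c (by simp)
        simp [hc]
    rw [hlstrip]
    exact pv_rstrip_flat (p :: t) (by simp) h1 h2

lemma pv_loop1 (g : Int → List Char) (x : Int) : ∀ (N : Nat) (cs : List Char),
    (List.range N).foldl (fun acc (j : Nat) => g (x - ((j : Int) + 1)) ++ ' ' :: acc) cs
      = ((List.range N).map (fun (t : Nat) => g (x - (N : Int) + (t : Int)) ++ [' '])).flatten ++ cs := by
  intro N
  induction N with
  | zero => intro cs; simp
  | succ N ih =>
    intro cs
    conv_lhs => rw [List.range_succ]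
    rw [List.foldl_append]
    simp only [List.foldl_cons, List.foldl_nil]
    rw [ih]
    conv_rhs => rw [List.range_succ_eq_map]
    have harg : ∀ t : Nat, x - (((N : Int)) + 1) + (((t : Int)) + 1) = x - (N : Int) + (t : Int) := by
      intro t; ring
    simp only [List.map_cons, List.map_map, Function.comp_def, List.flatten_cons, Nat.cast_zero,
      add_zero]
    have hfun : (fun (t : Nat) => g (x - ((N : Int) + 1) + ((t : Int) + 1)) ++ [' '])
        = (fun (t : Nat) => g (x - (N : Int) + (t : Int)) ++ [' ']) := by
      funext t; rw [harg]
    simp [hfun]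

lemma pv_loop2 {α : Type} (g : α → List Char) : ∀ (l : List α) (cs : List Char),
    l.foldl (fun acc k => acc ++ g k ++ [' ']) cs = cs ++ (l.map (fun k => g k ++ [' '])).flatten := by
  intro l
  induction l with
  | nil => intro cs; simp
  | cons k t ih => intro cs; simp [List.append_assoc]

lemma pv_pyRange_map (N : Nat) : ∀ (a : Int),
    PySem.List.pyRange a (a + (N : Int)) = (List.range N).map (fun (t : Nat) => a + (t : Int)) := by
  induction N with
  | zero => intro a; simp [PySem.List.pyRange]

  | succ N ih =>
    intro a
    rw [PySem.List.pyRange_one_cons (by omega)]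
    rw [show a + ((N + 1 : Nat) : Int) = (a + 1) + (N : Int) by push_cast; ring, ih (a + 1)]
    rw [List.range_succ_eq_map]
    simp only [List.map_cons, List.map_map, Function.comp_def, Nat.cast_zero, add_zero]
    congr 1
    apply List.map_congr_left
    intro t _
    push_cast
    ring

lemma pv_toList_foldl1 (f : Int → String) : ∀ (l : List Int) (s : String),
    (l.foldl (fun acc j => f j ++ " " ++ acc) s).toList
      = l.foldl (fun acc j => (f j).toList ++ ' ' :: acc) s.toList := by
  intro l
  induction l with
  | nil => intro s; rfl
  | cons j t ih =>
    intro s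
    simp only [List.foldl_cons]
    rw [ih]
    congr 1
    simp

lemma pv_toList_foldl2 (f : Int → String) : ∀ (l : List Int) (s : String),
    (l.foldl (fun acc k => acc ++ f k ++ " ") s).toList
      = l.foldl (fun acc k => acc ++ (f k).toList ++ [' ']) s.toList := by
  intro l
  induction l with
  | nil => intro s; rfl
  | cons k t ih =>
    intro s
    simp only [List.foldl_cons]
    rw [ih]
    congr 1
    simp

def pvZfc (w v : Int) : List Char := PySem.Chars.zfill (PySem.Int.toChars v) w

lemma pv_digitChar_isDigit (m : Nat) (h : m < 10) : (Nat.digitChar m).isDigit = true := by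
  interval_cases m <;> decide

lemma pv_toDigitsCore_chars : ∀ (fuel n : Nat) (ds : List Char),
    ∃ l, Nat.toDigitsCore 10 fuel n ds = l ++ ds ∧ (∀ c ∈ l, c.isDigit = true) ∧ (0 < fuel → l ≠ []) := by
  intro fuel
  induction fuel with
  | zero => intro n ds; exact ⟨[], by simp [Nat.toDigitsCore], by simp, by simp⟩
  | succ f ih =>
    intro n ds
    by_cases h : n / 10 = 0
    · refine ⟨[Nat.digitChar (n % 10)], ?_, ?_, ?_⟩
      · simp [Nat.toDigitsCore, h]
      · intro c hc; simp at hc; subst hc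
        exact pv_digitChar_isDigit _ (Nat.mod_lt _ (by norm_num))
      · simp
    · obtain ⟨l, hl, hdig, _⟩ := ih (n / 10) (Nat.digitChar (n % 10) :: ds)
      refine ⟨l ++ [Nat.digitChar (n % 10)], ?_, ?_, ?_⟩
      · simp only [Nat.toDigitsCore, h, if_false]
        rw [hl]
        simp
      · intro c hc
        rcases List.mem_append.1 hc with hc | hc
        · exact hdig c hc
        · simp at hc; subst hc
          exact pv_digitChar_isDigit _ (Nat.mod_lt _ (by norm_num))
      · simp

lemma pv_toDigits_ne_nil (n : Nat) : Nat.toDigits 10 n ≠ [] := by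
  obtain ⟨l, hl, _, hne⟩ := pv_toDigitsCore_chars (n + 1) n []
  rw [Nat.toDigits, hl]
  simpa using hne (Nat.succ_pos n)

lemma pv_toDigits_isDigit (n : Nat) : ∀ c ∈ Nat.toDigits 10 n, c.isDigit = true := by
  obtain ⟨l, hl, hdig, _⟩ := pv_toDigitsCore_chars (n + 1) n []
  intro c hc
  rw [Nat.toDigits, hl] at hc
  simp at hc
  exact hdig c hc

lemma pv_toChars_ne_nil (v : Int) : PySem.Int.toChars v ≠ [] := by
  unfold PySem.Int.toChars
  split
  · simp
  · exact pv_toDigits_ne_nil _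

lemma pv_isDigit_not_space {c : Char} (h : c.isDigit = true) : PySem.Chars.isspace c = false := by
  simp [Char.isDigit, UInt32.le_iff_toNat_le] at h
  simp only [PySem.Chars.isspace, Char.toNat]
  simp
  omega

lemma pv_toChars_not_space (v : Int) : ∀ c ∈ PySem.Int.toChars v, PySem.Chars.isspace c = false := by
  intro c hc
  unfold PySem.Int.toChars at hc
  split at hc
  · rcases List.mem_cons.1 hc with hc | hc
    · subst hc; decide
    · exact pv_isDigit_not_space (pv_toDigits_isDigit _ c hc)
  · exact pv_isDigit_not_space (pv_toDigits_isDigit _ c hc)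

lemma pv_zfc_ne_nil (w v : Int) : pvZfc w v ≠ [] :=
  pv_zfill_ne_nil w _ (pv_toChars_ne_nil v)

lemma pv_zfc_not_space (w v : Int) : ∀ c ∈ pvZfc w v, PySem.Chars.isspace c = false := by
  intro c hc
  rcases pv_zfill_chars_sub _ _ c hc with h | h
  · exact pv_toChars_not_space v c h
  · subst h; decide

lemma pv_elem_eq (w x n : Int) :
    PySem.Str.strip ((PySem.List.pyRange 0 (n + 1)).foldl
        (fun result_str k => result_str ++ PySem.Str.zfill (PySem.Int.toStr (x + k)) w ++ " ")
        ((PySem.List.pyRange 0 n).foldl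
          (fun result_str j => PySem.Str.zfill (PySem.Int.toStr (x - (j + 1))) w ++ " " ++ result_str) ""))
      = PySem.Str.join " " ((PySem.List.pyRange (x - n) (x + n + 1)).map
          (fun v => PySem.Str.zfill (PySem.Int.toStr v) w)) := by
  rw [← String.toList_inj]
  rw [PySem.Str.toList_strip, PySem.Str.toList_join]
  simp only [List.map_map, Function.comp_def, PySem.Str.toList_zfill, PySem.Int.toList_toStr]
  have hsep : (" " : String).toList = [' '] := by decide
  rw [hsep]
  by_cases hn : 0 ≤ n
  · -- n = ↑N
    obtain ⟨N, hN⟩ : ∃ N : Nat, (N : Int) = n := ⟨n.toNat, Int.toNat_of_nonneg hn⟩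
    -- the two inner folds, moved to the char level
    rw [pv_toList_foldl2, pv_toList_foldl1]
    simp only [PySem.Str.toList_zfill, PySem.Int.toList_toStr]
    have h1 : PySem.List.pyRange 0 n = (List.range N).map (fun (j : Nat) => (j : Int)) := by
      rw [← hN, PySem.List.pyRange_zero_natCast]
    have h2 : PySem.List.pyRange 0 (n + 1) = (List.range (N + 1)).map (fun (j : Nat) => (j : Int)) := by
      rw [show n + 1 = ((N + 1 : Nat) : Int) by omega, PySem.List.pyRange_zero_natCast]
    rw [h1, h2, List.foldl_map, List.foldl_map]
    have hempty : ("" : String).toList = [] := by decide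
    rw [hempty]
    have hfold : ∀ v : Int, PySem.Chars.zfill (PySem.Int.toChars v) w = pvZfc w v := fun _ => rfl
    simp only [hfold]
    rw [pv_loop1 (fun v => pvZfc w v) x N]
    rw [pv_loop2 (fun (k : Nat) => pvZfc w (x + (k : Int))) (List.range (N + 1))]
    -- right-hand side: the single contiguous range
    have hrange : PySem.List.pyRange (x - n) (x + n + 1)
        = (List.range (N + (N + 1))).map (fun (t : Nat) => (x - (N : Int)) + (t : Int)) := by
      rw [show x + n + 1 = (x - (N : Int)) + ((N + (N + 1) : Nat) : Int) by push_cast; omega,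
        show x - n = x - (N : Int) by rw [hN]]
      exact pv_pyRange_map (N + (N + 1)) (x - (N : Int))
    rw [hrange]
    rw [List.append_nil]
    rw [show (List.range (N + (N + 1))).map (fun (t : Nat) => (x - (N : Int)) + (t : Int))
        = (List.range (N + (N + 1))).map (fun (t : Nat) => x - (N : Int) + (t : Int)) from rfl]
    -- split the contiguous range into the descending-built and ascending-built halves
    have hsplit : List.range (N + (N + 1)) = List.range N ++ (List.range (N + 1)).map (fun t => N + t) :=
      List.range_add
    rw [List.map_map]
    simp only [Function.comp_def]
    rw [← pv_strip_flat ((List.range (N + (N + 1))).map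
        (fun (t : Nat) => pvZfc w (x - (N : Int) + (t : Int))))
        (by intro p hp; rcases List.mem_map.1 hp with ⟨t, _, rfl⟩; exact pv_zfc_ne_nil _ _)
        (by intro p hp; rcases List.mem_map.1 hp with ⟨t, _, rfl⟩; exact pv_zfc_not_space _ _)]
    congr 1
    rw [hsplit, List.map_append, List.map_append, List.flatten_append, List.map_map, List.map_map]
    congr 1
    simp only [Function.comp_def]
    rw [List.map_map]
    simp only [Function.comp_def]
    apply congrArg
    apply List.map_congr_left
    intro t _
    have harg2 : x - (N : Int) + ((N + t : Nat) : Int) = x + (t : Int) := by push_cast; ring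
    rw [harg2]
  · -- n < 0: all three ranges are empty, both sides are the empty string
    have h1 : PySem.List.pyRange 0 n = [] := by
      simp only [PySem.List.pyRange]
      norm_num
      intro h; omega
    have h2 : PySem.List.pyRange 0 (n + 1) = [] := by
      simp only [PySem.List.pyRange]
      norm_num
      intro h; omega
    have h3 : PySem.List.pyRange (x - n) (x + n + 1) = [] := by
      simp only [PySem.List.pyRange]
      norm_num
      intro h; omega
    rw [h1, h2, h3]
    simp [PySem.Chars.join]
    decide


-- ===== VERDICT (by name: the statement is the Claim_ definition above) =====
theorem exploded_numbers_spec : Claim_equal_exploded_numbers := by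
  intro ints n _ hpre
  show exploded_numbers ints n = exploded_numbers_alt ints n
  have hne : ints ≠ [] := hpre
  unfold exploded_numbers exploded_numbers_alt
  cases hmax : PySem.List.max? ints (fun y => y) with
  | none => exact absurd ((PySem.List.max?_eq_none_iff ints _).1 hmax) hne
  | some m =>
    simp only
    rw [PySem.List.foldl_append_singleton_eq_map
      (fun i => PySem.Str.strip ((PySem.List.pyRange 0 (n + 1)).foldl
        (fun result_str k => result_str ++ PySem.Str.zfill (PySem.Int.toStr (PySem.List.pyGetD ints i 0 + k)) (PySem.Str.len (PySem.Int.toStr (m + n))) ++ " ")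
        ((PySem.List.pyRange 0 n).foldl
          (fun result_str j => PySem.Str.zfill (PySem.Int.toStr (PySem.List.pyGetD ints i 0 - (j + 1))) (PySem.Str.len (PySem.Int.toStr (m + n))) ++ " " ++ result_str) "")))]
    rw [List.nil_append]
    rw [show (fun i => PySem.Str.strip ((PySem.List.pyRange 0 (n + 1)).foldl
        (fun result_str k => result_str ++ PySem.Str.zfill (PySem.Int.toStr (PySem.List.pyGetD ints i 0 + k)) (PySem.Str.len (PySem.Int.toStr (m + n))) ++ " ")
        ((PySem.List.pyRange 0 n).foldl
          (fun result_str j => PySem.Str.zfill (PySem.Int.toStr (PySem.List.pyGetD ints i 0 - (j + 1))) (PySem.Str.len (PySem.Int.toStr (m + n))) ++ " " ++ result_str) "")))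
      = (fun v => PySem.Str.join " " ((PySem.List.pyRange (v - n) (v + n + 1)).map
          (fun x => PySem.Str.zfill (PySem.Int.toStr x) (PySem.Str.len (PySem.Int.toStr (m + n))))))
        ∘ (fun i => PySem.List.pyGetD ints i 0) from funext fun i => pv_elem_eq _ _ n]
    rw [← List.map_map, PySem.List.map_pyGetD_pyRange_zero]
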